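-- pv_equiv track=rewrite | github.com/AeterDev/StarWars_SimplePygame | src/game/ui.py | heart_states_for_health
-- ===== SOURCE A (Python) =====
-- def heart_states_for_health(health_halves: int, max_health_halves: int) -> list[str]:
--     """Return the heart fill state per heart slot."""
--
--     states: list[str] = []
--     remaining = max(0, health_halves)
--     slots = max_health_halves // 2
--     for _ in range(slots):
--         if remaining >= 2:
--             states.append("heart")
--         elif remaining == 1:
--             states.append("half_heart")
--         else:
--             states.append("empty_heart")
--         remaining = max(0, remaining - 2)
--     return states
-- ===== SOURCE B (Python) =====
-- def heart_states_for_health(health_halves: int, max_health_halves: int) -> list[str]: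
--     """Return the heart fill state per heart slot."""
--     r = max(0, health_halves)
--     slots = max_health_halves // 2
--     full = min(r // 2, slots)
--     half = 1 if full < slots and r % 2 == 1 else 0
--     return (["heart"] * full
--             + ["half_heart"] * half
--             + ["empty_heart"] * (slots - full - half))
-- ===== Notes on version B (the rewrite author's own statement) =====
-- stated objective: simpler
-- what changed: Replaces the per-slot loop with a decremented `remaining` accumulator by a closed-form segment construction: full hearts, at most one half heart, then empty-heart padding, concatenated via list multiplication.
import Mathlib
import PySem

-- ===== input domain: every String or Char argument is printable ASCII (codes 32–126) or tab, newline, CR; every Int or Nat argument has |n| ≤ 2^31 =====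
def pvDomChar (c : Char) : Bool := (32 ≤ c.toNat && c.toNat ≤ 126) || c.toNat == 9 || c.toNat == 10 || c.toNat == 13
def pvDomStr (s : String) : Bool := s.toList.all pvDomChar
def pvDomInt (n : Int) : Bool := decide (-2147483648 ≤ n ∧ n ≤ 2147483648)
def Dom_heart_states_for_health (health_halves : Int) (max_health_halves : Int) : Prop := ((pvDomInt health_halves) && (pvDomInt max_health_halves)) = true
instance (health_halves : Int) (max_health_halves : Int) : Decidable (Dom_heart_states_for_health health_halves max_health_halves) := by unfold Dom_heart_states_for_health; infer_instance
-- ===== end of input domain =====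

-- B builds the result as three concatenated segments (full / half / empty) instead of A's per-slot loop with a running `remaining` accumulator; objective: simpler.


-- ===== PORT A =====
-- the `for _ in range(slots)` loop: one step per slot, threading (states, remaining)
def pvALoop : Nat → Int → List String → List String
  | 0, _, states => states
  | n + 1, remaining, states =>
      let s : String :=
        if remaining ≥ 2 then "heart"
        else if remaining = 1 then "half_heart"
        else "empty_heart"
      pvALoop n (max 0 (remaining - 2)) (states ++ [s])

def heart_states_for_health (health_halves : Int) (max_health_halves : Int) : List String :=
  let remaining := max 0 health_halves
  let slots := PySem.Int.floordiv max_health_halves 2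
  pvALoop slots.toNat remaining []

-- ===== PORT B =====
def heart_states_for_health_alt (health_halves : Int) (max_health_halves : Int) : List String :=
  let r := max 0 health_halves
  let slots := PySem.Int.floordiv max_health_halves 2
  let full := min (PySem.Int.floordiv r 2) slots
  let half : Int := if full < slots ∧ PySem.Int.mod r 2 = 1 then 1 else 0
  PySem.List.pyRepeat ["heart"] full
    ++ PySem.List.pyRepeat ["half_heart"] half
    ++ PySem.List.pyRepeat ["empty_heart"] (slots - full - half)

-- ===== PRECONDITION & SPEC =====
def Spec_heart_states_for_health (health_halves : Int) (max_health_halves : Int) (out : List String) : Prop := out = heart_states_for_health_alt health_halves max_health_halves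
instance (health_halves : Int) (max_health_halves : Int) (out : List String) : Decidable (Spec_heart_states_for_health health_halves max_health_halves out) := by unfold Spec_heart_states_for_health; infer_instance

-- ===== CLAIM (what is proved, stated in full; the proofs are below) =====
def Claim_equal_heart_states_for_health : Prop := ∀ (health_halves : Int) (max_health_halves : Int), Dom_heart_states_for_health health_halves max_health_halves → Spec_heart_states_for_health health_halves max_health_halves (heart_states_for_health health_halves max_health_halves)

-- ===== LEMMAS AND PROOFS =====

-- common normal form: the three segments, in Nat arithmetic
def pvSegs (r n : Nat) : List String :=
  List.replicate (min (r / 2) n) "heart"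
    ++ (if r / 2 < n ∧ r % 2 = 1 then ["half_heart"] else [])
    ++ List.replicate (n - min (r / 2) n - (if r / 2 < n ∧ r % 2 = 1 then 1 else 0)) "empty_heart"

lemma pvALoop_eq (n : Nat) : ∀ (r : Nat) (acc : List String),
    pvALoop n (r : Int) acc = acc ++ pvSegs r n := by
  induction n with
  | zero => intro r acc; simp [pvALoop, pvSegs]
  | succ n ih =>
    intro r acc
    match r with
    | 0 =>
      have : ∀ k, pvALoop k (0 : Int) acc = acc ++ List.replicate k "empty_heart" := by
        intro k
        induction k generalizing acc with
        | zero => simp [pvALoop]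
        | succ k ihk =>
          simp only [pvALoop]
          norm_num
          rw [ihk]
          simp [List.replicate_succ]
      rw [show ((0:Nat):Int) = (0:Int) by norm_num, this]
      simp [pvSegs]
    | 1 =>
      simp only [pvALoop]
      norm_num
      have : ∀ k (acc : List String), pvALoop k (0 : Int) acc = acc ++ List.replicate k "empty_heart" := by
        intro k
        induction k with
        | zero => intro acc; simp [pvALoop]
        | succ k ihk =>
          intro acc
          simp only [pvALoop]
          norm_num
          rw [ihk]
          simp [List.replicate_succ]
      rw [this]
      simp [pvSegs]
    | (r' + 2) =>
      have h2 : ((r' + 2 : Nat) : Int) ≥ 2 := by push_cast; omega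
      have hmax : max 0 (((r' + 2 : Nat) : Int) - 2) = ((r' : Nat) : Int) := by push_cast; omega
      simp only [pvALoop, if_pos h2, hmax]
      rw [ih]
      have hdiv : (r' + 2) / 2 = r' / 2 + 1 := by omega
      have hmod : (r' + 2) % 2 = r' % 2 := by omega
      simp only [pvSegs, hdiv, hmod]
      have hmin : min (r' / 2 + 1) (n + 1) = min (r' / 2) n + 1 := by omega
      rw [hmin]
      have hsub : n + 1 - (min (r' / 2) n + 1) = n - min (r' / 2) n := by omega
      rw [hsub]
      by_cases hc : r' / 2 < n ∧ r' % 2 = 1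
      · rw [if_pos hc, if_pos (by omega : r' / 2 + 1 < n + 1 ∧ r' % 2 = 1),
            if_pos hc, if_pos (by omega : r' / 2 + 1 < n + 1 ∧ r' % 2 = 1)]
        simp [List.replicate_succ]
      · rw [if_neg hc, if_neg (by omega : ¬(r' / 2 + 1 < n + 1 ∧ r' % 2 = 1)),
            if_neg hc, if_neg (by omega : ¬(r' / 2 + 1 < n + 1 ∧ r' % 2 = 1))]
        simp [List.replicate_succ]

lemma pvAlt_eq_segs (h m : Int) (hs : 0 < PySem.Int.floordiv m 2) :
    heart_states_for_health_alt h m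
      = pvSegs (max 0 h).toNat (PySem.Int.floordiv m 2).toNat := by
  obtain ⟨s, hsc⟩ : ∃ s : Nat, PySem.Int.floordiv m 2 = (s : Int) :=
    ⟨(PySem.Int.floordiv m 2).toNat, by omega⟩
  obtain ⟨r, hrc⟩ : ∃ r : Nat, max 0 h = (r : Int) := ⟨(max 0 h).toNat, by omega⟩
  have e1 : PySem.Int.floordiv ((r : Nat) : Int) 2 = ((r / 2 : Nat) : Int) := by
    exact_mod_cast PySem.Int.floordiv_natCast r 2
  have e2 : PySem.Int.mod ((r : Nat) : Int) 2 = ((r % 2 : Nat) : Int) := by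
    exact_mod_cast PySem.Int.mod_natCast r 2
  have e3 : min (((r / 2 : Nat)) : Int) ((s : Nat) : Int) = ((min (r / 2) s : Nat) : Int) := by
    omega
  simp only [heart_states_for_health_alt, hsc, hrc, e1, e2, e3, Int.toNat_natCast]
  by_cases hc : r / 2 < s ∧ r % 2 = 1
  · rw [if_pos (show ((min (r / 2) s : Nat) : Int) < ((s : Nat) : Int) ∧ ((r % 2 : Nat) : Int) = 1 by
      push_cast; omega)]
    simp only [pvSegs, if_pos hc, PySem.List.pyRepeat_singleton, Int.toNat_natCast]
    congr 2
    all_goals first | rfl | omega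
  · rw [if_neg (show ¬(((min (r / 2) s : Nat) : Int) < ((s : Nat) : Int) ∧ ((r % 2 : Nat) : Int) = 1) by
      push_cast; omega)]
    simp only [pvSegs, if_neg hc, PySem.List.pyRepeat_singleton, Int.toNat_natCast]
    congr 2
    all_goals first | rfl | omega

-- ===== VERDICT (by name: the statement is the Claim_ definition above) =====
theorem heart_states_for_health_spec : Claim_equal_heart_states_for_health := by
  intro h m _
  unfold Spec_heart_states_for_health
  by_cases hs : 0 < PySem.Int.floordiv m 2
  · rw [pvAlt_eq_segs h m hs]
    unfold heart_states_for_health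
    have hrc : max 0 h = (((max 0 h).toNat : Nat) : Int) := by omega
    rw [show pvALoop (PySem.Int.floordiv m 2).toNat (max 0 h) []
          = pvALoop (PySem.Int.floordiv m 2).toNat (((max 0 h).toNat : Nat) : Int) [] by rw [← hrc]]
    rw [pvALoop_eq]
    simp
  · -- slots ≤ 0: both sides are []
    have hz : (PySem.Int.floordiv m 2).toNat = 0 := by omega
    unfold heart_states_for_health heart_states_for_health_alt
    simp only [hz, pvALoop]
    have hfr : 0 ≤ PySem.Int.floordiv (max 0 h) 2 := by
      have := PySem.Int.floordiv_eq_ediv_of_pos (a := max 0 h) (b := 2) (by omega)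
      rw [this]; positivity
    have hmin : min (PySem.Int.floordiv (max 0 h) 2) (PySem.Int.floordiv m 2)
        = PySem.Int.floordiv m 2 := by omega
    rw [hmin]
    have hlt : ¬ (PySem.Int.floordiv m 2 < PySem.Int.floordiv m 2 ∧
        PySem.Int.mod (max 0 h) 2 = 1) := by simp
    rw [if_neg hlt]
    have hle : m / 2 ≤ 0 := by
      rw [← PySem.Int.floordiv_eq_ediv_of_pos (by norm_num : (0 : Int) < 2)]; omega
    simp [PySem.List.pyRepeat, hle]
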